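-- pv_equiv track=rewrite | github.com/ExExExTenTaSeeOn/DupAlert | v0.0/main.py | extract_url_and_flags
-- ===== SOURCE A (Python) =====
-- def extract_url_and_flags(args):
--     """
--     Extract URL and flags from the given args.
--     We'll try to find a URL that starts with http:// or https://.
--     If found, that is considered the URL and the rest are flags.
--     """
--     url = None
--     # We'll scan from the end to find a URL
--     for i in range(len(args)-1, -1, -1):
--         if args[i].startswith('http://') or args[i].startswith('https://'):
--             url = args[i]
--             flags = args[:i] + args[i+1:]
--             break
--
--     if url is None:
--         # No URL found
--         flags = args
--     return url, flags
-- ===== SOURCE B (Python) =====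
-- def extract_url_and_flags(args):
--     idxs = [i for i, a in enumerate(args)
--             if a.startswith('http://') or a.startswith('https://')]
--     if idxs:
--         i = idxs[-1]
--         return args[i], args[:i] + args[i+1:]
--     return None, args
-- ===== Notes on version B (the rewrite author's own statement) =====
-- stated objective: idiomatic
-- what changed: Replaces the backward index scan with early break by a forward comprehension collecting all URL indices, then selecting the last one.
import Mathlib
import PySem

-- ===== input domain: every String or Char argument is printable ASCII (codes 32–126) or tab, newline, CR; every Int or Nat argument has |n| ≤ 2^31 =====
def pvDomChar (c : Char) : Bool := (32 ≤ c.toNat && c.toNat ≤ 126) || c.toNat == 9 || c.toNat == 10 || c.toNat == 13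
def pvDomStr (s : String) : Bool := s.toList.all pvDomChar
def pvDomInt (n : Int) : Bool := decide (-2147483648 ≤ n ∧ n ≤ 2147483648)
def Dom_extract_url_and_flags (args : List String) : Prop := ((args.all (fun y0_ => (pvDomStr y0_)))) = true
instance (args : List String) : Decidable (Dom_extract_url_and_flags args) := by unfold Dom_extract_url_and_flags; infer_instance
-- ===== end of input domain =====

-- B replaces A's backward scan with early break by a forward pass collecting all
-- URL indices and selecting the last (idiomatic; same cost, same return value).

-- ===== PORT A =====
-- args[i].startswith('http://') or args[i].startswith('https://')
def pvIsUrl (s : String) : Bool :=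
  PySem.Str.startswith s "http://" || PySem.Str.startswith s "https://"

-- the 'for i in range(len(args)-1, -1, -1)' loop with its break: first matching
-- index of the (descending) index list wins; falling through gives (None, args)
def pvLoopA (args : List String) : List Int → Option String × List String
  | [] => (none, args)
  | i :: rest =>
    let x := PySem.List.pyGetD args i ""   -- i is always in range here (drawn from range(len-1,-1,-1))
    if pvIsUrl x then
      (some x, PySem.List.slice args none (some i) ++ PySem.List.slice args (some (i + 1)) none)
    else pvLoopA args rest

def extract_url_and_flags (args : List String) : Option String × List String :=
  pvLoopA args (PySem.List.pyRange ((args.length : Int) - 1) (-1) (-1))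

-- ===== PORT B =====
def extract_url_and_flags_alt (args : List String) : Option String × List String :=
  let idxs := ((PySem.List.enumerate args 0).filter (fun p => pvIsUrl p.2)).map (·.1)
  match idxs.getLast? with
  | some i =>
      (some (PySem.List.pyGetD args i ""),
       PySem.List.slice args none (some i) ++ PySem.List.slice args (some (i + 1)) none)
  | none => (none, args)

-- ===== PRECONDITION & SPEC =====
def Spec_extract_url_and_flags (args : List String) (out : Option String × List String) : Prop := out = extract_url_and_flags_alt args
instance (args : List String) (out : Option String × List String) : Decidable (Spec_extract_url_and_flags args out) := by unfold Spec_extract_url_and_flags; infer_instance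

-- ===== CLAIM (what is proved, stated in full; the proofs are below) =====
def Claim_equal_extract_url_and_flags : Prop := ∀ (args : List String), Dom_extract_url_and_flags args → Spec_extract_url_and_flags args (extract_url_and_flags args)

-- ===== LEMMAS AND PROOFS =====

-- A's loop returns the result for the FIRST index of its list that satisfies the test
theorem pvLoopA_eq_find (args : List String) (L : List Int) :
    pvLoopA args L =
      match L.find? (fun i => pvIsUrl (PySem.List.pyGetD args i "")) with
      | some i =>
          (some (PySem.List.pyGetD args i ""),
           PySem.List.slice args none (some i) ++ PySem.List.slice args (some (i + 1)) none)
      | none => (none, args) := by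
  induction L with
  | nil => rfl
  | cons i rest ih =>
    simp only [pvLoopA, List.find?]
    by_cases h : pvIsUrl (PySem.List.pyGetD args i "") <;> simp [h, ih]

-- B's index list is the ascending filter of range(len(args))
theorem pvIdxs_eq (args : List String) :
    ((PySem.List.enumerate args 0).filter (fun p => pvIsUrl p.2)).map (·.1) =
      (PySem.List.pyRange 0 (args.length : Int) 1).filter
        (fun i => pvIsUrl (PySem.List.pyGetD args i "")) := by
  rw [PySem.List.enumerate_eq_map_pyRange (d := "")]
  rw [List.filter_map, List.map_map]
  simp only [Function.comp_def]
  simp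

theorem extract_url_and_flags_spec : Claim_equal_extract_url_and_flags := by
  intro args _
  show extract_url_and_flags args = extract_url_and_flags_alt args
  unfold extract_url_and_flags extract_url_and_flags_alt
  rw [pvIdxs_eq]
  have hrange : PySem.List.pyRange ((args.length : Int) - 1) (-1) (-1) =
      (PySem.List.pyRange 0 (args.length : Int) 1).reverse := by
    rw [PySem.List.pyRange_neg_one_eq_reverse]; norm_num
  have hfind : ∀ (p : Int → Bool) (l : List Int), l.reverse.find? p = (l.filter p).getLast? := by
    intro p l
    rw [← List.head?_filter, List.filter_reverse, List.head?_reverse]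
  rw [pvLoopA_eq_find, hrange, hfind]
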